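-- pv_equiv track=rewrite | github.com/synqratech/omega-walls | omega/pitheta/gold_slice_prefill.py | _expand_text_to_bucket
-- ===== SOURCE A (Python) =====
-- from typing import Any, Dict, Iterable, List, Mapping, MutableMapping, Sequence, Tuple
--
-- def _word_tokens(text: str) -> int:
--     return max(1, len([tok for tok in str(text).strip().split() if tok]))
--
-- def _expand_text_to_bucket(text: str, bucket: str) -> Tuple[str, int]:
--     text_norm = str(text).strip()
--     if not text_norm:
--         return text_norm, 0
--     target_min = {"64": 1, "128_256": 128, "512": 512}.get(str(bucket), 1)
--     target_max = {"64": 96, "128_256": 256, "512": 640}.get(str(bucket), 96)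
--     pieces = [text_norm]
--     tokens = _word_tokens(text_norm)
--     while tokens < int(target_min):
--         pieces.append(text_norm)
--         joined = " ".join(pieces)
--         tokens = _word_tokens(joined)
--         if len(pieces) > 64:
--             break
--     joined = " ".join(pieces)
--     toks = _word_tokens(joined)
--     if toks > int(target_max):
--         words = [w for w in joined.split() if w]
--         joined = " ".join(words[: int(target_max)])
--         toks = _word_tokens(joined)
--     return joined, toks
-- ===== SOURCE B (Python) =====
-- from typing import Tuple
--
-- def _word_tokens(text: str) -> int:
--     return max(1, len([tok for tok in str(text).strip().split() if tok]))
--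
-- def _expand_text_to_bucket(text: str, bucket: str) -> Tuple[str, int]:
--     text_norm = str(text).strip()
--     if not text_norm:
--         return text_norm, 0
--     target_min = {"64": 1, "128_256": 128, "512": 512}.get(str(bucket), 1)
--     target_max = {"64": 96, "128_256": 256, "512": 640}.get(str(bucket), 96)
--     base = _word_tokens(text_norm)
--     # closed-form repeat count: smallest k with k*base >= target_min, capped at 65 (A's break bound)
--     k = min(65, -(-target_min // base))
--     joined = " ".join([text_norm] * k)
--     toks = _word_tokens(joined)
--     if toks > target_max:
--         joined = " ".join(joined.split()[:target_max])
--         toks = _word_tokens(joined)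
--     return joined, toks
-- ===== Notes on version B (the rewrite author's own statement) =====
-- stated objective: simpler
-- what changed: A's while-loop that repeatedly appends a copy, re-joins all pieces and re-counts tokens is replaced by a single closed-form copy count k = min(65, ceil(target_min/base)) computed from one base token count, followed by one join; the max-cap truncation branch is kept.
import Mathlib
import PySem

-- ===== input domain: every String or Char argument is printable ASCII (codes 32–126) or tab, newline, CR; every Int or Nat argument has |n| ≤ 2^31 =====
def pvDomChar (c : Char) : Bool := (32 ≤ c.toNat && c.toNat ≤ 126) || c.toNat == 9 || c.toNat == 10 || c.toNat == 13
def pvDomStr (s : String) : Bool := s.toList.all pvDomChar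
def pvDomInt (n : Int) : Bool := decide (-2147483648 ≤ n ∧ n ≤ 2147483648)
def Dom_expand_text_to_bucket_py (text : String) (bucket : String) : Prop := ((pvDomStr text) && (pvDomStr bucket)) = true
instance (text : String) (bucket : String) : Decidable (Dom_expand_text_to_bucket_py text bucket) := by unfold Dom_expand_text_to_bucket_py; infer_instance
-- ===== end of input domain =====

-- B replaces A's append/rejoin/recount repetition loop by a single closed-form copy count
-- k = min(65, ceil(target_min/base)) followed by one join; objective: simpler.

-- ===== PORT A =====
-- shared module helper _word_tokens (identical in Source A and Source B)
def word_tokens (text : String) : Int :=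
  max 1 (((PySem.Str.split₀ (PySem.Str.strip text)).filter (fun tok => tok ≠ "")).length : Int)

-- the while-loop of A: appends text_norm while the token count is short, breaking past 64 pieces
def expandLoop (text_norm : String) (target_min : Int) (pieces : List String) (tokens : Int) :
    List String :=
  if tokens < target_min then
    let pieces' := pieces ++ [text_norm]
    let joined := PySem.Str.join " " pieces'
    let tokens' := word_tokens joined
    if (pieces'.length : Int) > 64 then pieces'
    else expandLoop text_norm target_min pieces' tokens'
  else pieces
termination_by 65 - pieces.length
decreasing_by
  rename_i h1 h2
  simp only [pieces', List.length_append, List.length_cons, List.length_nil] at h2 ⊢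
  omega

def expand_text_to_bucket_py (text : String) (bucket : String) : String × Int :=
  let text_norm := PySem.Str.strip text
  if text_norm = "" then (text_norm, 0)
  else
    let target_min : Int :=
      (((PySem.Dict.empty.insert "64" (1 : Int)).insert "128_256" 128).insert "512" 512).getD bucket 1
    let target_max : Int :=
      (((PySem.Dict.empty.insert "64" (96 : Int)).insert "128_256" 256).insert "512" 640).getD bucket 96
    let pieces := expandLoop text_norm target_min [text_norm] (word_tokens text_norm)
    let joined := PySem.Str.join " " pieces
    let toks := word_tokens joined
    if toks > target_max then
      let words := (PySem.Str.split₀ joined).filter (fun w => w ≠ "")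
      let joined' := PySem.Str.join " " (PySem.List.slice words none (some target_max))
      (joined', word_tokens joined')
    else (joined, toks)

-- ===== PORT B =====
def expand_text_to_bucket_py_alt (text : String) (bucket : String) : String × Int :=
  let text_norm := PySem.Str.strip text
  if text_norm = "" then (text_norm, 0)
  else
    let target_min : Int :=
      (((PySem.Dict.empty.insert "64" (1 : Int)).insert "128_256" 128).insert "512" 512).getD bucket 1
    let target_max : Int :=
      (((PySem.Dict.empty.insert "64" (96 : Int)).insert "128_256" 256).insert "512" 640).getD bucket 96
    let base := word_tokens text_norm
    -- k = min(65, -(-target_min // base))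
    let k : Int := min 65 (-(PySem.Int.floordiv (-target_min) base))
    let joined := PySem.Str.join " " (List.replicate k.toNat text_norm)
    let toks := word_tokens joined
    if toks > target_max then
      let joined' := PySem.Str.join " "
        (PySem.List.slice (PySem.Str.split₀ joined) none (some target_max))
      (joined', word_tokens joined')
    else (joined, toks)

-- ===== PRECONDITION & SPEC =====
def Spec_expand_text_to_bucket_py (text : String) (bucket : String) (out : String × Int) : Prop := out = expand_text_to_bucket_py_alt text bucket
instance (text : String) (bucket : String) (out : String × Int) : Decidable (Spec_expand_text_to_bucket_py text bucket out) := by unfold Spec_expand_text_to_bucket_py; infer_instance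

-- ===== CLAIM (what is proved, stated in full; the proofs are below) =====
def Claim_equal_expand_text_to_bucket_py : Prop := ∀ (text : String) (bucket : String), Dom_expand_text_to_bucket_py text bucket → Spec_expand_text_to_bucket_py text bucket (expand_text_to_bucket_py text bucket)

-- ===== LEMMAS AND PROOFS =====

theorem go_acc (s cur : List Char) (acc : List (List Char)) :
    PySem.Chars.split₀.go s cur acc = acc.reverse ++ PySem.Chars.split₀.go s cur [] := by
  induction s generalizing cur acc with
  | nil => cases cur <;> simp [PySem.Chars.split₀.go]
  | cons c rest ih =>
    by_cases hc : PySem.Chars.isspace c = true <;> cases cur <;>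
      simp only [PySem.Chars.split₀.go, hc, if_true, if_false, List.isEmpty_nil,
        List.isEmpty_cons, Bool.false_eq_true, ite_true, ite_false]
    · rw [ih _ acc]
    · rw [ih _ (_ :: acc), ih _ [_]]; simp
    · rw [ih _ acc]
    · rw [ih _ acc]

theorem go_append (a b : List Char) (cur : List Char) :
    PySem.Chars.split₀.go (a ++ ' ' :: b) cur [] =
      PySem.Chars.split₀.go a cur [] ++ PySem.Chars.split₀.go b [] [] := by
  induction a generalizing cur with
  | nil =>
    cases cur with
    | nil =>
      simp [List.nil_append, PySem.Chars.split₀.go,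
        show PySem.Chars.isspace ' ' = true from rfl]
    | cons h t =>
      simp only [List.nil_append, PySem.Chars.split₀.go,
        show PySem.Chars.isspace ' ' = true from rfl, if_true, List.isEmpty_nil,
        List.isEmpty_cons, Bool.false_eq_true, ite_false, List.reverse_nil]
      rw [go_acc _ _ [_]]

  | cons d a' ih =>
    by_cases hd : PySem.Chars.isspace d = true <;> cases cur <;>
      simp only [List.cons_append, PySem.Chars.split₀.go, hd, if_true, if_false,
        List.isEmpty_nil, List.isEmpty_cons, Bool.false_eq_true, ite_true, ite_false]
    · exact ih []
    · rw [go_acc (a' ++ ' ' :: b) [] [_], go_acc a' [] [_], ih []]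
      simp
    · exact ih [d]
    · exact ih (d :: _)

theorem split₀_append (a b : List Char) :
    PySem.Chars.split₀ (a ++ ' ' :: b) = PySem.Chars.split₀ a ++ PySem.Chars.split₀ b :=
  go_append a b []

theorem go_ne_nil (s cur : List Char) (acc : List (List Char)) (h : cur ≠ [] ∨ acc ≠ []) :
    PySem.Chars.split₀.go s cur acc ≠ [] := by
  induction s generalizing cur acc with
  | nil => cases cur <;> simp_all [PySem.Chars.split₀.go]
  | cons c rest ih =>
    by_cases hc : PySem.Chars.isspace c = true <;> cases cur <;>
      simp only [PySem.Chars.split₀.go, hc, if_true, if_false, List.isEmpty_nil,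
        List.isEmpty_cons, Bool.false_eq_true, ite_true, ite_false]
    · exact ih _ _ (by simp_all)
    · exact ih _ _ (by simp)
    · exact ih _ _ (by simp)
    · exact ih _ _ (by simp)

theorem go_mem_ne_nil (s cur : List Char) (acc : List (List Char))
    (hacc : ∀ x ∈ acc, x ≠ []) : ∀ t ∈ PySem.Chars.split₀.go s cur acc, t ≠ [] := by
  induction s generalizing cur acc with
  | nil =>
    cases cur with
    | nil => simpa [PySem.Chars.split₀.go] using hacc
    | cons h t =>
      simp only [PySem.Chars.split₀.go, List.isEmpty_cons, Bool.false_eq_true, ite_false]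
      intro x hx
      rw [List.mem_reverse, List.mem_cons] at hx
      rcases hx with hx | hx
      · subst hx; simp
      · exact hacc x hx
  | cons c rest ih =>
    by_cases hc : PySem.Chars.isspace c = true <;> cases cur <;>
      simp only [PySem.Chars.split₀.go, hc, if_true, if_false, List.isEmpty_nil,
        List.isEmpty_cons, Bool.false_eq_true, ite_true, ite_false]
    · exact ih _ _ hacc
    · refine ih _ _ ?_
      intro x hx
      rw [List.mem_cons] at hx
      rcases hx with hx | hx
      · subst hx; simp
      · exact hacc x hx
    · exact ih _ _ hacc
    · exact ih _ _ hacc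

theorem mem_split₀_ne_nil (cs : List Char) : ∀ t ∈ PySem.Chars.split₀ cs, t ≠ [] :=
  go_mem_ne_nil cs [] [] (by simp)

theorem split₀_ne_nil_of_head (c : Char) (rest : List Char) (hc : PySem.Chars.isspace c = false) :
    PySem.Chars.split₀ (c :: rest) ≠ [] := by
  unfold PySem.Chars.split₀
  simp [PySem.Chars.split₀.go, hc]
  exact go_ne_nil rest [c] [] (by simp)

theorem filter_split₀ (u : String) :
    (PySem.Str.split₀ u).filter (fun w => w ≠ "") = PySem.Str.split₀ u := by
  apply List.filter_eq_self.mpr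
  intro a ha
  simp only [decide_eq_true_eq]
  intro h
  have : a.toList ∈ PySem.Chars.split₀ u.toList := by
    rw [← PySem.Str.split₀_map_toList]; exact List.mem_map_of_mem ha
  have := mem_split₀_ne_nil _ _ this
  simp [h] at this

theorem wt_eq (t : String) :
    word_tokens t = max 1 (((PySem.Chars.split₀ (PySem.Chars.strip t.toList)).length : Int)) := by
  rw [word_tokens, filter_split₀]
  have h : (PySem.Str.split₀ (PySem.Str.strip t)).length =
      (PySem.Chars.split₀ (PySem.Chars.strip t.toList)).length := by
    rw [← PySem.Str.toList_strip, ← PySem.Str.split₀_map_toList, List.length_map]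
  rw [h]

-- a list of chars whose first and last chars are not whitespace
def Stripped (p : List Char) : Prop :=
  (∀ c, p.head? = some c → PySem.Chars.isspace c = false) ∧
  (∀ c, p.getLast? = some c → PySem.Chars.isspace c = false)

theorem head?_dropWhile_isspace (l : List Char) (c : Char)
    (h : (List.dropWhile PySem.Chars.isspace l).head? = some c) :
    PySem.Chars.isspace c = false := by
  have := List.head?_dropWhile_not PySem.Chars.isspace l
  rw [h] at this
  exact this

theorem getLast?_dropWhile_isspace (l : List Char) (c : Char)
    (h : (List.dropWhile PySem.Chars.isspace l).getLast? = some c) :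
    l.getLast? = some c := by
  obtain ⟨pre, hpre⟩ := List.dropWhile_suffix (l := l) PySem.Chars.isspace
  rw [← hpre, List.getLast?_append, h]
  rfl

theorem stripped_strip (t : List Char) : Stripped (PySem.Chars.strip t) := by
  unfold PySem.Chars.strip PySem.Chars.rstrip PySem.Chars.lstrip
  constructor
  · intro c hc
    rw [List.head?_reverse] at hc
    have := getLast?_dropWhile_isspace _ _ hc
    rw [List.getLast?_reverse] at this
    exact head?_dropWhile_isspace t c this
  · intro c hc
    rw [List.getLast?_reverse] at hc
    exact head?_dropWhile_isspace _ c hc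

theorem strip_of_stripped (p : List Char) (h : Stripped p) : PySem.Chars.strip p = p := by
  obtain ⟨h1, h2⟩ := h
  unfold PySem.Chars.strip PySem.Chars.lstrip PySem.Chars.rstrip
  cases p with
  | nil => rfl
  | cons c r =>
    have hc : PySem.Chars.isspace c = false := h1 c rfl
    rw [List.dropWhile_cons_of_neg (by simp [hc])]
    cases hrev : (c :: r).reverse with
    | nil => simp at hrev
    | cons d tl =>
      have hd : PySem.Chars.isspace d = false := by
        apply h2
        rw [← List.head?_reverse, hrev]; rfl
      rw [List.dropWhile_cons_of_neg (by simp [hd]), ← hrev, List.reverse_reverse]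

theorem join_replicate_head_last (p : List Char) (n : Nat) (hp : p ≠ []) :
    (PySem.Chars.join [' '] (List.replicate (n + 1) p)).head? = p.head? ∧
      (PySem.Chars.join [' '] (List.replicate (n + 1) p)).getLast? = p.getLast? := by
  induction n with
  | zero => simp [PySem.Chars.join_singleton]
  | succ m ih =>
    rw [List.replicate_succ, List.replicate_succ, PySem.Chars.join_cons_cons,
      ← List.replicate_succ]
    constructor
    · rw [List.append_assoc, List.head?_append_of_ne_nil _ hp]
    · rw [List.getLast?_append]
      have h2 := ih.2
      rw [h2]
      cases hgl : p.getLast? with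
      | none => simp [List.getLast?_eq_none_iff] at hgl; exact absurd hgl hp
      | some d => rfl

theorem stripped_join_replicate (p : List Char) (n : Nat) (hp : p ≠ []) (hs : Stripped p) :
    Stripped (PySem.Chars.join [' '] (List.replicate (n + 1) p)) := by
  obtain ⟨hh, hl⟩ := join_replicate_head_last p n hp
  exact ⟨fun c hc => hs.1 c (hh ▸ hc), fun c hc => hs.2 c (hl ▸ hc)⟩

theorem split₀_join_replicate_length (p : List Char) (n : Nat) :
    (PySem.Chars.split₀ (PySem.Chars.join [' '] (List.replicate (n + 1) p))).length =
      (n + 1) * (PySem.Chars.split₀ p).length := by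
  induction n with
  | zero => simp [PySem.Chars.join_singleton]
  | succ m ih =>
    rw [List.replicate_succ, List.replicate_succ, PySem.Chars.join_cons_cons,
      ← List.replicate_succ, List.append_assoc, List.singleton_append, split₀_append,
      List.length_append, ih]
    ring

theorem length_split₀_pos (p : List Char) (hp : p ≠ []) (hs : Stripped p) :
    1 ≤ (PySem.Chars.split₀ p).length := by
  cases p with
  | nil => exact absurd rfl hp
  | cons c r =>
    have hc : PySem.Chars.isspace c = false := hs.1 c rfl
    have := split₀_ne_nil_of_head c r hc
    cases h : PySem.Chars.split₀ (c :: r) with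
    | nil => exact absurd h this
    | cons _ _ => simp [h]

theorem tok_join (s : String) (hs : s.toList ≠ []) (hstr : Stripped s.toList) (n : Nat) :
    word_tokens (PySem.Str.join " " (List.replicate (n + 1) s)) =
      ((n + 1 : Nat) : Int) * ((PySem.Chars.split₀ s.toList).length : Int) := by
  rw [wt_eq]
  have htl : (PySem.Str.join " " (List.replicate (n + 1) s)).toList =
      PySem.Chars.join [' '] (List.replicate (n + 1) s.toList) := by
    rw [PySem.Str.toList_join, List.map_replicate]; rfl
  rw [htl, strip_of_stripped _ (stripped_join_replicate _ n hs hstr),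
    split₀_join_replicate_length]
  have hL := length_split₀_pos s.toList hs hstr
  have h1 : (1 : Int) ≤ ((n : Int) + 1) * ((PySem.Chars.split₀ s.toList).length : Int) := by
    have hL' : (1 : Int) ≤ ((PySem.Chars.split₀ s.toList).length : Int) := by exact_mod_cast hL
    nlinarith
  push_cast
  omega

theorem wt_strip (text : String) :
    word_tokens (PySem.Str.strip text) =
      max 1 (((PySem.Chars.split₀ (PySem.Chars.strip text.toList)).length : Int)) := by
  rw [wt_eq, PySem.Str.toList_strip, strip_of_stripped _ (stripped_strip _)]

theorem loop_spec (s : String) (hs : s.toList ≠ []) (hstr : Stripped s.toList)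
    (tmin L q : Int) (hLdef : L = ((PySem.Chars.split₀ s.toList).length : Int))
    (hq1 : 1 ≤ q) (hbr1 : (q - 1) * L < tmin) (hbr2 : tmin ≤ q * L) (fuel : Nat) :
    ∀ n : Nat, 1 ≤ n → n ≤ 64 → 64 - n ≤ fuel →
      expandLoop s tmin (List.replicate n s) ((n : Int) * L) =
        List.replicate (min 65 (max n q.toNat)) s := by
  have hL : 1 ≤ L := by
    have := length_split₀_pos s.toList hs hstr
    omega
  induction fuel with
  | zero =>
    intro n h1 h2 h3
    have hn : n = 64 := by omega
    subst hn
    rw [expandLoop]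
    by_cases hlt : ((64 : Nat) : Int) * L < tmin
    · have h64q : ((64 : Nat) : Int) < q := by
        have hq : ((64 : Nat) : Int) * L < q * L := by omega
        exact lt_of_mul_lt_mul_right hq (by omega)
      simp only [← List.replicate_succ', List.length_replicate, hlt, if_true]
      rw [if_pos (by norm_num)]
      congr 1
      omega
    · rw [if_neg hlt]
      have hqn : q ≤ ((64 : Nat) : Int) := by
        have hq : (q - 1) * L < ((64 : Nat) : Int) * L := by omega
        have := lt_of_mul_lt_mul_right hq (by omega : (0 : Int) ≤ L)
        omega
      congr 1
      omega
  | succ fuel ih =>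
    intro n h1 h2 h3
    rw [expandLoop]
    by_cases hlt : (n : Int) * L < tmin
    · have hnq : (n : Int) < q := by
        have hq : (n : Int) * L < q * L := by omega
        exact lt_of_mul_lt_mul_right hq (by omega)
      simp only [← List.replicate_succ', List.length_replicate, hlt, if_true]
      by_cases hbig : ((n + 1 : Nat) : Int) > 64
      · rw [if_pos hbig]
        congr 1
        omega
      · rw [if_neg hbig]
        rw [tok_join s hs hstr n, ← hLdef]
        have hrec := ih (n + 1) (by omega) (by push_cast at hbig; omega) (by omega)
        push_cast at hrec ⊢
        rw [hrec]
        congr 1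
        omega
    · rw [if_neg hlt]
      have hqn : q ≤ (n : Int) := by
        have hq : (q - 1) * L < (n : Int) * L := by omega
        have := lt_of_mul_lt_mul_right hq (by omega : (0 : Int) ≤ L)
        omega
      congr 1
      omega

theorem ceil_one_le (tmin L : Int) (htm : 1 ≤ tmin) (hL : 1 ≤ L) :
    1 ≤ -(PySem.Int.floordiv (-tmin) L) := by
  have hbr : (-(PySem.Int.floordiv (-tmin) L) - 1) * L < tmin ∧
      tmin ≤ -(PySem.Int.floordiv (-tmin) L) * L :=
    (PySem.Int.neg_floordiv_neg_eq_iff_of_pos (by omega)).mp rfl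
  by_contra h
  have hq0 : -(PySem.Int.floordiv (-tmin) L) ≤ 0 := by omega
  have : -(PySem.Int.floordiv (-tmin) L) * L ≤ 0 :=
    mul_nonpos_of_nonpos_of_nonneg hq0 (by omega)
  omega

theorem one_le_bucket_min (bucket : String) :
    1 ≤ ((((PySem.Dict.empty.insert "64" (1 : Int)).insert "128_256" 128).insert
        "512" 512).getD bucket 1) := by
  by_cases h512 : bucket = "512"
  · subst h512; simp [PySem.Dict.getD_insert_self]
  · rw [PySem.Dict.getD_insert_of_ne _ _ _ h512]
    by_cases h128 : bucket = "128_256"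
    · subst h128; simp [PySem.Dict.getD_insert_self]
    · rw [PySem.Dict.getD_insert_of_ne _ _ _ h128]
      by_cases h64 : bucket = "64"
      · subst h64; simp [PySem.Dict.getD_insert_self]
      · rw [PySem.Dict.getD_insert_of_ne _ _ _ h64]
        simp [PySem.Dict.getD, PySem.Dict.get?, PySem.Dict.empty]

-- ===== VERDICT (by name: the statement is the Claim_ definition above) =====
theorem expand_text_to_bucket_py_spec : Claim_equal_expand_text_to_bucket_py := by
  intro text bucket _
  unfold Spec_expand_text_to_bucket_py
  unfold expand_text_to_bucket_py expand_text_to_bucket_py_alt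
  by_cases hempty : PySem.Str.strip text = ""
  · simp [hempty]
  · simp only [hempty, if_false]
    have hp : (PySem.Str.strip text).toList ≠ [] :=
      fun h => hempty (String.toList_eq_nil_iff.mp h)
    have hstr : Stripped (PySem.Str.strip text).toList := by
      rw [PySem.Str.toList_strip]; exact stripped_strip _
    have htm := one_le_bucket_min bucket
    have hL : (1 : Int) ≤ ((PySem.Chars.split₀ (PySem.Str.strip text).toList).length : Int) := by
      have := length_split₀_pos _ hp hstr
      omega
    have hwts : word_tokens (PySem.Str.strip text) =
        ((PySem.Chars.split₀ (PySem.Str.strip text).toList).length : Int) := by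
      rw [wt_strip, ← PySem.Str.toList_strip]
      omega
    have hq1 := ceil_one_le _ _ htm hL
    have hbr := (PySem.Int.neg_floordiv_neg_eq_iff_of_pos (a :=
        (((PySem.Dict.empty.insert "64" (1 : Int)).insert "128_256" 128).insert
          "512" 512).getD bucket 1)
      (b := ((PySem.Chars.split₀ (PySem.Str.strip text).toList).length : Int))
      (by omega)).mp rfl
    have hloop := loop_spec (PySem.Str.strip text) hp hstr
      ((((PySem.Dict.empty.insert "64" (1 : Int)).insert "128_256" 128).insert
          "512" 512).getD bucket 1)
      ((PySem.Chars.split₀ (PySem.Str.strip text).toList).length : Int)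
      (-(PySem.Int.floordiv
          (-((((PySem.Dict.empty.insert "64" (1 : Int)).insert "128_256" 128).insert
              "512" 512).getD bucket 1))
          ((PySem.Chars.split₀ (PySem.Str.strip text).toList).length : Int)))
      rfl hq1 hbr.1 hbr.2 64 1 (by norm_num) (by norm_num) (by norm_num)
    simp only [List.replicate_one, Nat.cast_one, one_mul] at hloop
    rw [← hwts] at hloop
    have hk : (min 65
        (-(PySem.Int.floordiv
            (-((((PySem.Dict.empty.insert "64" (1 : Int)).insert "128_256" 128).insert
                "512" 512).getD bucket 1))
            ((PySem.Chars.split₀ (PySem.Str.strip text).toList).length : Int)))).toNat =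
        min 65 (max 1 (-(PySem.Int.floordiv
            (-((((PySem.Dict.empty.insert "64" (1 : Int)).insert "128_256" 128).insert
                "512" 512).getD bucket 1))
            ((PySem.Chars.split₀ (PySem.Str.strip text).toList).length : Int))).toNat) := by
      omega
    rw [hloop, hwts, hk, filter_split₀]
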